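-- pv_equiv track=rewrite | github.com/fanny-projects-INT/Electrophysiology | functions/density_time.py | assign_cluster_group
-- ===== SOURCE A (Python) =====
-- from typing import Optional, Dict, List, Tuple
--
-- def region_matches_any_pattern(region_name: str, patterns: List[str]) -> bool:
--     r = str(region_name).strip()
--     for p in patterns:
--         p = str(p).strip()
--         if r == p or r.startswith(p):
--             return True
--     return False
--
-- def assign_cluster_group(
--     region_by_cluster: Dict[int, str],
--     region_groups: Dict[str, List[str]],
-- ) -> Dict[int, str]:
--     cluster_group: Dict[int, str] = {}
--
--     for cid, region_name in region_by_cluster.items():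
--         assigned = "OTHER"
--         for group_name, patterns in region_groups.items():
--             if region_matches_any_pattern(region_name, patterns):
--                 assigned = group_name
--                 break
--         cluster_group[int(cid)] = assigned
--
--     return cluster_group
-- ===== SOURCE B (Python) =====
-- from typing import Dict, List
--
--
-- def assign_cluster_group(
--     region_by_cluster: Dict[int, str],
--     region_groups: Dict[str, List[str]],
-- ) -> Dict[int, str]:
--     # Index every stripped pattern by the index of the first group containing
--     # it; a region is then classified by looking up each of its prefixes in
--     # the index and keeping the minimal group index (earliest group wins,
--     # exactly A's first-match-by-group rule). No pattern scan per region.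
--     names = list(region_groups.keys())
--     idx: Dict[str, int] = {}
--     for i, (g, pats) in enumerate(region_groups.items()):
--         for p in pats:
--             key = str(p).strip()
--             if key not in idx:
--                 idx[key] = i
--     out: Dict[int, str] = {}
--     for cid, region_name in region_by_cluster.items():
--         r = str(region_name).strip()
--         best = None
--         for k in range(len(r) + 1):
--             j = idx.get(r[:k])
--             if j is not None and (best is None or j < best):
--                 best = j
--         out[int(cid)] = "OTHER" if best is None else names[best]
--     return out
-- ===== Notes on version B (the rewrite author's own statement) =====
-- stated objective: faster
-- what changed: B builds a hash index mapping every stripped pattern to its first group's index once, then classifies each region by looking up all prefixes of the stripped region in that index and taking the minimal group index, replacing A's per-region nested scan over all groups and patterns with O(L) dictionary lookups per region.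
import Mathlib
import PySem

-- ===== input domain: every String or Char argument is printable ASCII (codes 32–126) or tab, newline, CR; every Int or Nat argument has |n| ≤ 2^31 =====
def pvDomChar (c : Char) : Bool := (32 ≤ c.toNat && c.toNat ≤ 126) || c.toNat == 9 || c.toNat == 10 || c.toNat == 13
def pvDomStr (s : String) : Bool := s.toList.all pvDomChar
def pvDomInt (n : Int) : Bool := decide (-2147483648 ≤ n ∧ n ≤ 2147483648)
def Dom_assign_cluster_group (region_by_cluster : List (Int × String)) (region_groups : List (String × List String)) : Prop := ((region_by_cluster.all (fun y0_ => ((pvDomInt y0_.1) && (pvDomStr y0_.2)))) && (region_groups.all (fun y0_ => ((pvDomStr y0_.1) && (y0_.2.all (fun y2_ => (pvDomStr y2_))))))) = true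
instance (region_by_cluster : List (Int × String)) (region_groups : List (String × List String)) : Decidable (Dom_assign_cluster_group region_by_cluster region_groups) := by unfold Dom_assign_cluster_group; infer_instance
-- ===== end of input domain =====

-- ===== PORT A =====
-- B replaces A's per-region nested group/pattern scan by a prefix index: every
-- stripped pattern is hashed to its first group's index once, and each region is
-- classified by dictionary lookups of its prefixes (objective: faster).

-- inner 'for p in patterns' loop of region_matches_any_pattern
def region_matches_go (r : String) : List String → Bool
  | [] => false
  | p :: rest =>
    let ps := PySem.Str.strip p
    if r == ps || PySem.Str.startswith r ps then true else region_matches_go r rest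

def region_matches_any_pattern (region_name : String) (patterns : List String) : Bool :=
  region_matches_go (PySem.Str.strip region_name) patterns

-- 'for group_name, patterns in region_groups.items(): … break' with assigned = "OTHER" default
def assign_go (region_name : String) : List (String × List String) → String
  | [] => "OTHER"
  | (group_name, patterns) :: rest =>
    if region_matches_any_pattern region_name patterns then group_name
    else assign_go region_name rest

def assign_cluster_group (region_by_cluster : List (Int × String)) (region_groups : List (String × List String)) : List (Int × String) :=
  (region_by_cluster.foldl
    (fun (cluster_group : PySem.Dict Int String) cr =>
      cluster_group.insert cr.1 (assign_go cr.2 region_groups))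
    PySem.Dict.empty).items

-- ===== PORT B =====
-- 'for i, (g, pats) in enumerate(region_groups.items()): for p in pats: if key not in idx: idx[key] = i'
def acg_idx (region_groups : List (String × List String)) : PySem.Dict String Int :=
  (PySem.List.enumerate region_groups).foldl
    (fun d ig => ig.2.2.foldl
      (fun d p =>
        let key := PySem.Str.strip p
        if d.contains key then d else d.insert key ig.1) d)
    PySem.Dict.empty

-- 'best = None; for k in range(len(r) + 1): j = idx.get(r[:k]); if j is not None and (best is None or j < best): best = j'
def acg_best (idx : PySem.Dict String Int) (r : String) : Option Int :=
  (PySem.List.pyRange 0 (PySem.Str.len r + 1) 1).foldl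
    (fun best k =>
      match idx.get? (PySem.Str.slice r none (some k)) with
      | none => best
      | some j =>
        match best with
        | none => some j
        | some b => if j < b then some j else best)
    none

def assign_cluster_group_alt (region_by_cluster : List (Int × String)) (region_groups : List (String × List String)) : List (Int × String) :=
  let names := region_groups.map Prod.fst
  let idx := acg_idx region_groups
  (region_by_cluster.foldl
    (fun (out : PySem.Dict Int String) cr =>
      out.insert cr.1
        (match acg_best idx (PySem.Str.strip cr.2) with
         | none => "OTHER"
         | some b => (PySem.List.pyGet? names b).getD "OTHER"))
    PySem.Dict.empty).items
-- ===== PRECONDITION & SPEC =====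
def Spec_assign_cluster_group (region_by_cluster : List (Int × String)) (region_groups : List (String × List String)) (out : List (Int × String)) : Prop := out = assign_cluster_group_alt region_by_cluster region_groups
instance (region_by_cluster : List (Int × String)) (region_groups : List (String × List String)) (out : List (Int × String)) : Decidable (Spec_assign_cluster_group region_by_cluster region_groups out) := by unfold Spec_assign_cluster_group; infer_instance

-- ===== CLAIM (what is proved, stated in full; the proofs are below) =====
def Claim_equal_assign_cluster_group : Prop := ∀ (region_by_cluster : List (Int × String)) (region_groups : List (String × List String)), Dom_assign_cluster_group region_by_cluster region_groups → Spec_assign_cluster_group region_by_cluster region_groups (assign_cluster_group region_by_cluster region_groups)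

-- ===== LEMMAS AND PROOFS =====

-- pattern match without the redundant equality test
def matchesG (rs : String) (pats : List String) : Bool :=
  pats.any (fun p => PySem.Str.startswith rs (PySem.Str.strip p))

-- index of the first group (counting from n) owning pattern q exactly
def owner (q : String) : List (String × List String) → Int → Option Int
  | [], _ => none
  | g :: rest, n => if g.2.any (fun p => PySem.Str.strip p == q) then some n else owner q rest (n + 1)

-- index of the first group matching rs by prefix
def firstMatch (rs : String) : List (String × List String) → Option Nat
  | [] => none
  | g :: rest => if matchesG rs g.2 then some 0 else (firstMatch rs rest).map (· + 1)

theorem startswith_of_eq (r p : String) (h : r = p) : PySem.Str.startswith r p = true := by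
  subst h; simp [PySem.Chars.startswith_iff]

theorem region_matches_go_eq (rs : String) (pats : List String) :
    region_matches_go rs pats = matchesG rs pats := by
  induction pats with
  | nil => simp [region_matches_go, matchesG]
  | cons p rest ih =>
    have hC : PySem.Str.startswith rs (PySem.Str.strip p)
        = PySem.Chars.startswith rs.toList (PySem.Chars.strip p.toList) := by simp
    by_cases hs : PySem.Str.startswith rs (PySem.Str.strip p) = true
    · have hs' := hs; rw [hC] at hs'
      simp [region_matches_go, matchesG, hs']
    · have hs' : PySem.Chars.startswith rs.toList (PySem.Chars.strip p.toList) = false := by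
        rw [← hC]; simpa using hs
      have heq : (rs == PySem.Str.strip p) = false := by
        rcases Bool.eq_false_or_eq_true (rs == PySem.Str.strip p) with h | h
        · exact absurd (startswith_of_eq _ _ (eq_of_beq h)) hs
        · exact h
      simp only [region_matches_go, heq, Bool.false_or, ih]
      simp [matchesG, hs']

theorem get?_patfold (q : String) (n : Int) (pats : List String) (d : PySem.Dict String Int) :
    (pats.foldl
      (fun d p =>
        let key := PySem.Str.strip p
        if d.contains key then d else d.insert key n) d).get? q
      = (d.get? q).or (if pats.any (fun p => PySem.Str.strip p == q) then some n else none) := by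
  induction pats generalizing d with
  | nil => simp
  | cons p rest ih =>
    simp only [List.foldl_cons, List.any_cons]
    by_cases hc : d.contains (PySem.Str.strip p) = true
    · by_cases he : (PySem.Str.strip p == q) = true
      · obtain ⟨v, hv⟩ : ∃ v, d.get? q = some v := by
          have heq := eq_of_beq he
          subst heq
          rcases h : d.get? (PySem.Str.strip p) with _ | v
          · rw [(PySem.Dict.get?_eq_none_iff_contains d _).mp h] at hc; simp at hc
          · exact ⟨v, rfl⟩
        simp [hc, ih, hv, he]
      · simp [hc, ih, he]
    · have hc' : d.contains (PySem.Str.strip p) = false := by simpa using hc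
      by_cases he : (PySem.Str.strip p == q) = true
      · have heq := eq_of_beq he
        subst heq
        have hn : d.get? (PySem.Str.strip p) = none :=
          (PySem.Dict.get?_eq_none_iff_contains d _).mpr hc'
        simp [hc', ih, hn, PySem.Dict.get?_insert_self]
      · have hne : q ≠ PySem.Str.strip p := fun h => he (by simp [h])
        have hg : (d.insert (PySem.Str.strip p) n).get? q = d.get? q :=
          PySem.Dict.get?_insert_of_ne _ _ hne
        simp [hc', ih, he, hg]

theorem get?_acg_idx_gen (q : String) (rg : List (String × List String)) :
    ∀ (n : Int) (d : PySem.Dict String Int),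
    ((PySem.List.enumerate rg n).foldl
      (fun d ig => ig.2.2.foldl
        (fun d p =>
          let key := PySem.Str.strip p
          if d.contains key then d else d.insert key ig.1) d) d).get? q
      = (d.get? q).or (owner q rg n) := by
  induction rg with
  | nil => intro n d; simp [PySem.List.enumerate_nil, owner]
  | cons g rest ih =>
    intro n d
    rw [PySem.List.enumerate_cons, List.foldl_cons, ih, get?_patfold, Option.or_assoc]
    simp only [owner]
    by_cases hm : g.2.any (fun p => PySem.Str.strip p == q) = true
    · simp [hm]
    · simp [hm]

theorem get?_acg_idx (q : String) (rg : List (String × List String)) :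
    (acg_idx rg).get? q = owner q rg 0 := by
  unfold acg_idx
  rw [get?_acg_idx_gen]
  simp

theorem owner_ge (q : String) (rg : List (String × List String)) :
    ∀ (n m : Int), owner q rg n = some m → n ≤ m := by
  induction rg with
  | nil => intro n m h; simp [owner] at h
  | cons g rest ih =>
    intro n m h
    simp only [owner] at h
    by_cases hm : g.2.any (fun p => PySem.Str.strip p == q) = true
    · simp [hm] at h; omega
    · simp [hm] at h
      have := ih (n + 1) m h
      omega

theorem foldmin_eq (n : Int) (h : Int → Option Int) (ks : List Int) :
    ∀ (b : Option Int),
    (∀ k ∈ ks, ∀ m, h k = some m → n ≤ m) →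
    (∀ m, b = some m → n ≤ m) →
    (b = some n ∨ ∃ k ∈ ks, h k = some n) →
    ks.foldl
      (fun best k =>
        match h k with
        | none => best
        | some j =>
          match best with
          | none => some j
          | some b' => if j < b' then some j else best) b = some n := by
  induction ks with
  | nil =>
    intro b _ _ hw
    rcases hw with hw | ⟨k, hk, _⟩
    · simpa using hw
    · simp at hk
  | cons k ks ih =>
    intro b hall hb hw
    simp only [List.foldl_cons]
    refine ih _ (fun k' hk' => hall k' (List.mem_cons_of_mem _ hk')) ?_ ?_
    · intro m hm
      rcases hj : h k with _ | j <;> rw [hj] at hm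
      · exact hb m hm
      · have hjn := hall k List.mem_cons_self j hj
        rcases b with _ | b'
        · simp at hm; omega
        · have hbn := hb b' rfl
          by_cases hlt : j < b'
          · simp [hlt] at hm; omega
          · simp [hlt] at hm; omega
    · rcases hw with hw | ⟨k', hk', hk'n⟩
      · subst hw
        left
        rcases hj : h k with _ | j
        · rfl
        · have hjn := hall k List.mem_cons_self j hj
          have hlt : ¬ j < n := by omega
          simp [hlt]
      · rcases List.mem_cons.mp hk' with hkk | hks
        · subst hkk
          left
          rw [hk'n]
          rcases b with _ | b'
          · rfl
          · have hbn := hb b' rfl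
            by_cases hlt : n < b'
            · simp [hlt]
            · have hbe : b' = n := by omega
              subst hbe; simp
        · right; exact ⟨k', hks, hk'n⟩

theorem slice_toList (rs : String) (k : Int) (hk : 0 ≤ k) :
    (PySem.Str.slice rs none (some k)).toList = rs.toList.take k.toNat := by
  rw [PySem.Str.toList_slice]
  exact PySem.List.slice_to _ hk

theorem match_witness (rs : String) (pats : List String) (hm : matchesG rs pats = true) :
    ∃ k : Int, k ∈ PySem.List.pyRange 0 (PySem.Str.len rs + 1) 1 ∧
      pats.any (fun p => PySem.Str.strip p == PySem.Str.slice rs none (some k)) = true := by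
  rcases List.any_eq_true.mp hm with ⟨p, hp, hsw⟩
  have hpre : (PySem.Str.strip p).toList <+: rs.toList := by
    rw [PySem.Str.startswith_eq] at hsw
    exact (PySem.Chars.startswith_iff _ _).mp hsw
  have hle := hpre.length_le
  refine ⟨((PySem.Str.strip p).toList.length : Int), ?_, ?_⟩
  · rw [PySem.List.mem_pyRange_one, PySem.Str.len_eq]
    exact ⟨by omega, by omega⟩
  · refine List.any_eq_true.mpr ⟨p, hp, ?_⟩
    have ht : (PySem.Str.slice rs none (some ((PySem.Str.strip p).toList.length : Int))).toList
        = (PySem.Str.strip p).toList := by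
      rw [slice_toList _ _ (by omega), Int.toNat_natCast]
      exact (List.prefix_iff_eq_take.mp hpre).symm
    exact beq_iff_eq.mpr (String.toList_inj.mp ht).symm

theorem match_of_slice (rs : String) (pats : List String) (k : Int) (hk : 0 ≤ k)
    (hany : pats.any (fun p => PySem.Str.strip p == PySem.Str.slice rs none (some k)) = true) :
    matchesG rs pats = true := by
  rcases List.any_eq_true.mp hany with ⟨p, hp, he⟩
  refine List.any_eq_true.mpr ⟨p, hp, ?_⟩
  rw [eq_of_beq he, PySem.Str.startswith_eq, slice_toList _ _ hk, PySem.Chars.startswith_iff]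
  exact List.take_prefix _ _

theorem ownfold (rs : String) (rg : List (String × List String)) :
    ∀ (n : Int),
    (PySem.List.pyRange 0 (PySem.Str.len rs + 1) 1).foldl
      (fun best k =>
        match owner (PySem.Str.slice rs none (some k)) rg n with
        | none => best
        | some j =>
          match best with
          | none => some j
          | some b' => if j < b' then some j else best) none
      = (firstMatch rs rg).map (fun j : Nat => n + (j : Int)) := by
  induction rg with
  | nil =>
    intro n
    simp only [firstMatch, Option.map_none]
    rw [PySem.List.foldl_congr_mem _ _ (fun acc x => acc) none
      (by intro acc x _; simp [owner])]
    exact PySem.List.foldl_ignore _ _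
  | cons g rest ih =>
    intro n
    by_cases hm : matchesG rs g.2 = true
    · simp only [firstMatch, hm, if_true, Option.map_some, Nat.cast_zero, add_zero]
      rcases match_witness rs g.2 hm with ⟨k, hk, hany⟩
      refine foldmin_eq n _ _ none ?_ (by simp) (Or.inr ⟨k, hk, ?_⟩)
      · intro k' _ m hsome
        exact owner_ge _ _ n m hsome
      · simp only [owner, hany, if_true]
    · simp only [firstMatch, hm]
      have hstep : ∀ (acc : Option Int), ∀ k ∈ PySem.List.pyRange 0 (PySem.Str.len rs + 1) 1,
          (match owner (PySem.Str.slice rs none (some k)) (g :: rest) n with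
           | none => acc
           | some j =>
             match acc with
             | none => some j
             | some b' => if j < b' then some j else acc)
          = (match owner (PySem.Str.slice rs none (some k)) rest (n + 1) with
             | none => acc
             | some j =>
               match acc with
               | none => some j
               | some b' => if j < b' then some j else acc) := by
        intro acc k hk
        have hk0 : 0 ≤ k := (PySem.List.mem_pyRange_one.mp hk).1
        have hno : g.2.any (fun p => PySem.Str.strip p == PySem.Str.slice rs none (some k)) = false := by
          rcases Bool.eq_false_or_eq_true (g.2.any (fun p => PySem.Str.strip p == PySem.Str.slice rs none (some k))) with h | h
          · exact absurd (match_of_slice rs g.2 k hk0 h) hm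
          · exact h
        simp [owner, hno]
      rw [PySem.List.foldl_congr_mem _ _ _ none (fun acc x hx => hstep acc x hx), ih (n + 1)]
      rcases firstMatch rs rest with _ | j
      · simp
      · simp only [Option.map_some]
        congr 1
        push_cast
        ring

theorem pyGet_names_succ {α : Type} (x : α) (xs : List α) (j : Nat) :
    PySem.List.pyGet? (x :: xs) ((j : Int) + 1) = PySem.List.pyGet? xs (j : Int) := by
  have h1 : ((j : Int) + 1) = ((j + 1 : Nat) : Int) := by push_cast; ring
  rw [h1, PySem.List.pyGet?_natCast, PySem.List.pyGet?_natCast]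
  simp

theorem final_red (r : String) (rg : List (String × List String)) :
    (match (firstMatch (PySem.Str.strip r) rg).map (fun j : Nat => (j : Int)) with
     | none => "OTHER"
     | some b => (PySem.List.pyGet? (rg.map Prod.fst) b).getD "OTHER") = assign_go r rg := by
  induction rg with
  | nil => simp [firstMatch, assign_go]
  | cons g rest ih =>
    obtain ⟨gn, pats⟩ := g
    simp only [assign_go, region_matches_any_pattern, region_matches_go_eq]
    by_cases hm : matchesG (PySem.Str.strip r) pats = true
    · simp only [firstMatch, hm, if_true, Option.map_some, Nat.cast_zero]
      rw [show ((0 : Int)) = ((0 : Nat) : Int) by simp, PySem.List.pyGet?_natCast]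
      simp
    · have hm' : matchesG (PySem.Str.strip r) pats = false := by simpa using hm
      rw [← ih]
      simp only [firstMatch, hm', Bool.false_eq_true, if_false]
      rcases firstMatch (PySem.Str.strip r) rest with _ | j
      · simp
      · simp only [Option.map_some, List.map_cons]
        rw [show (((j + 1 : Nat) : Int)) = ((j : Int) + 1) by push_cast; ring, pyGet_names_succ]

theorem bval_eq (rg : List (String × List String)) (r : String) :
    (match acg_best (acg_idx rg) (PySem.Str.strip r) with
     | none => "OTHER"
     | some b => (PySem.List.pyGet? (rg.map Prod.fst) b).getD "OTHER") = assign_go r rg := by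
  have hbest : acg_best (acg_idx rg) (PySem.Str.strip r)
      = (firstMatch (PySem.Str.strip r) rg).map (fun j : Nat => (j : Int)) := by
    unfold acg_best
    simp only [get?_acg_idx]
    rw [ownfold (PySem.Str.strip r) rg 0]
    simp
  rw [hbest]
  exact final_red r rg

-- ===== VERDICT (by name: the statement is the Claim_ definition above) =====
theorem assign_cluster_group_spec : Claim_equal_assign_cluster_group := by
  intro rbc rg _
  show assign_cluster_group rbc rg = assign_cluster_group_alt rbc rg
  unfold assign_cluster_group assign_cluster_group_alt
  refine congrArg PySem.Dict.items (PySem.List.foldl_congr_mem _ _ _ _ ?_)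
  intro acc cr _
  rw [bval_eq rg cr.2]
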